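-- pv_equiv track=rewrite | github.com/ftorradeflot/timeseries-parser | src/analysis/analysis_functions.py | count_state_change
-- ===== SOURCE A (Python) =====
-- def count_state_change(time_series, state_value):
--
--     output = []
--
--     for ts in time_series:
--         state_count = 0
--         in_state = True
--         epoch = ts[0][0]
--         for element in ts:
--
--             if str(element[1]) == str(state_value):
--                 if in_state:
--                     pass
--                 else:
--                     state_count += 1
--                     in_state = True
--             else:
--                 if in_state:
--                     in_state = False
--                 else:
--                     pass
--         output.append((epoch, state_count))
--
--     return [output]
-- ===== SOURCE B (Python) =====
-- def _run_keys(bools):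
--     # collapse consecutive equal booleans into the list of run keys
--     keys = []
--     for b in bools:
--         if not keys or keys[-1] != b:
--             keys.append(b)
--     return keys
--
--
-- def count_state_change(time_series, state_value):
--     target = str(state_value)
--     output = []
--     for ts in time_series:
--         epoch = ts[0][0]
--         keys = _run_keys(str(element[1]) == target for element in ts)
--         count = keys.count(True)
--         if keys and keys[0]:
--             count -= 1
--         output.append((epoch, count))
--     return [output]
-- ===== Notes on version B (the rewrite author's own statement) =====
-- stated objective: alternative
-- what changed: B replaces A's stateful in_state flag loop by a two-phase run-length decomposition: map each element to a boolean, collapse consecutive equal booleans into run keys, and count the True runs (minus one for a leading in-state run).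
import Mathlib
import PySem

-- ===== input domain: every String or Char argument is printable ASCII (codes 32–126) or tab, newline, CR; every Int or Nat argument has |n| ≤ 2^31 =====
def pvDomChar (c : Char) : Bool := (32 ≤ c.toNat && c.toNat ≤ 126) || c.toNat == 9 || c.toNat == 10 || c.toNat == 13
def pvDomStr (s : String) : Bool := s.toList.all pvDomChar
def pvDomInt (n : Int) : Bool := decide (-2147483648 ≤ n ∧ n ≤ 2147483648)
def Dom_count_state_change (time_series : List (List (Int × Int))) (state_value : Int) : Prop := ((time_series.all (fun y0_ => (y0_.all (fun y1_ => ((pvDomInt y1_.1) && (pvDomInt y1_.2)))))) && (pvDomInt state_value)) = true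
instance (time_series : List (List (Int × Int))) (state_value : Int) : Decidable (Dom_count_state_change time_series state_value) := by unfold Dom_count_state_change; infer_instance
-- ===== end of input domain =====

-- B replaces A's stateful in_state flag loop by a run-length decomposition (map to booleans,
-- collapse consecutive equal booleans into run keys, count True runs minus a leading one); alternative, not faster.


-- ===== PORT A =====
def count_state_change (time_series : List (List (Int × Int))) (state_value : Int) : List (List (Int × Int)) :=
  let output : List (Int × Int) := time_series.foldl (fun output ts =>
    -- epoch = ts[0][0]  (IndexError on empty ts is excluded by Pre_)
    let epoch : Int := ((PySem.List.pyGet? ts 0).getD (0, 0)).1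
    let r : Int × Bool := ts.foldl (fun (p : Int × Bool) element =>
        if PySem.Int.toStr element.2 == PySem.Int.toStr state_value then
          if p.2 then p else (p.1 + 1, true)
        else
          if p.2 then (p.1, false) else p) (0, true)
    output ++ [(epoch, r.1)]) []
  [output]

-- ===== PORT B =====
-- _run_keys: collapse consecutive equal booleans into the list of run keys
def pvRunKeys (bools : List Bool) : List Bool :=
  bools.foldl (fun keys b => if keys.getLast? = some b then keys else keys ++ [b]) []

def count_state_change_alt (time_series : List (List (Int × Int))) (state_value : Int) : List (List (Int × Int)) :=
  let target := PySem.Int.toStr state_value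
  let output : List (Int × Int) := time_series.foldl (fun output ts =>
    let epoch : Int := ((PySem.List.pyGet? ts 0).getD (0, 0)).1
    let keys := pvRunKeys (ts.map (fun element => PySem.Int.toStr element.2 == target))
    let count : Int := (keys.count true : Int) - (if keys.head? = some true then 1 else 0)
    output ++ [(epoch, count)]) []
  [output]

-- ===== PRECONDITION & SPEC =====
-- Pre_ excludes inputs containing an empty inner series, on which the Python A raises IndexError at ts[0][0].
def Pre_count_state_change (time_series : List (List (Int × Int))) (state_value : Int) : Prop :=
  ∀ ts ∈ time_series, ts ≠ []
instance (time_series : List (List (Int × Int))) (state_value : Int) : Decidable (Pre_count_state_change time_series state_value) := by unfold Pre_count_state_change; infer_instance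
def pvWitness_count_state_change : (List (List (Int × Int))) × Int := ([[(1, 0), (2, 1), (3, 0), (4, 1)]], 1)

def Spec_count_state_change (time_series : List (List (Int × Int))) (state_value : Int) (out : List (List (Int × Int))) : Prop := out = count_state_change_alt time_series state_value
instance (time_series : List (List (Int × Int))) (state_value : Int) (out : List (List (Int × Int))) : Decidable (Spec_count_state_change time_series state_value out) := by unfold Spec_count_state_change; infer_instance

-- ===== CLAIM (what is proved, stated in full; the proofs are below) =====
def Claim_equal_count_state_change : Prop := ∀ (time_series : List (List (Int × Int))) (state_value : Int), Dom_count_state_change time_series state_value → Pre_count_state_change time_series state_value → Spec_count_state_change time_series state_value (count_state_change time_series state_value)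

-- ===== LEMMAS AND PROOFS =====

-- A's inner loop counts false→true transitions: recursive characterisation
def pvG : Bool → List Bool → Int
  | _, [] => 0
  | st, b :: r => (if b && !st then 1 else 0) + pvG b r

-- run keys, head-recursive form
def pvKeysAux : Bool → List Bool → List Bool
  | _, [] => []
  | p, b :: r => if b = p then pvKeysAux p r else b :: pvKeysAux b r

lemma foldlA_eq_pvG (sv : Int) (bs : List Bool) (c : Int) (st : Bool) :
    (bs.foldl (fun (p : Int × Bool) b =>
        if b then (if p.2 then p else (p.1 + 1, true))
        else (if p.2 then (p.1, false) else p)) (c, st)).1 = c + pvG st bs := by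
  induction bs generalizing c st with
  | nil => simp [pvG]
  | cons b r ih =>
    cases b <;> cases st <;> simp [pvG, List.foldl, ih] <;> ring

lemma runKeys_aux (bs : List Bool) (acc : List Bool) (p : Bool) (h : acc.getLast? = some p) :
    bs.foldl (fun keys b => if keys.getLast? = some b then keys else keys ++ [b]) acc
      = acc ++ pvKeysAux p bs := by
  induction bs generalizing acc p with
  | nil => simp [pvKeysAux]
  | cons b r ih =>
    simp only [List.foldl, pvKeysAux]
    by_cases hb : b = p
    · subst hb; rw [if_pos h, if_pos rfl, ih acc b h]
    · have : acc.getLast? ≠ some b := by rw [h]; simp [Ne.symm hb]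
      rw [if_neg this, if_neg hb, ih (acc ++ [b]) b (by simp)]
      simp

lemma pvRunKeys_eq : ∀ bs : List Bool,
    pvRunKeys bs = match bs with | [] => [] | b :: r => b :: pvKeysAux b r
  | [] => rfl
  | b :: r => by
    simp only [pvRunKeys, List.foldl]
    have : (List.getLast? ([] : List Bool) = some b) = False := by simp
    rw [show (if ([] : List Bool).getLast? = some b then ([] : List Bool) else [] ++ [b]) = [b] by simp]
    exact runKeys_aux r [b] b (by simp)

lemma pvG_eq_count (bs : List Bool) (p : Bool) :
    pvG p bs = ((pvKeysAux p bs).count true : Int) := by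
  induction bs generalizing p with
  | nil => simp [pvG, pvKeysAux]
  | cons b r ih =>
    cases b <;> cases p <;> simp [pvG, pvKeysAux, ih, List.count_cons] <;> omega

-- per-series: A's count equals B's run-based count
lemma per_series (sv : Int) (ts : List (Int × Int)) :
    (ts.foldl (fun (p : Int × Bool) element =>
        if PySem.Int.toStr element.2 == PySem.Int.toStr sv then
          if p.2 then p else (p.1 + 1, true)
        else
          if p.2 then (p.1, false) else p) (0, true)).1
      = (let keys := pvRunKeys (ts.map (fun e => PySem.Int.toStr e.2 == PySem.Int.toStr sv))
         ((keys.count true : Int) - (if keys.head? = some true then 1 else 0))) := by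
  have hmap : ts.foldl (fun (p : Int × Bool) element =>
        if PySem.Int.toStr element.2 == PySem.Int.toStr sv then
          if p.2 then p else (p.1 + 1, true)
        else
          if p.2 then (p.1, false) else p) (0, true)
      = (ts.map (fun e => PySem.Int.toStr e.2 == PySem.Int.toStr sv)).foldl
          (fun (p : Int × Bool) b =>
            if b then (if p.2 then p else (p.1 + 1, true))
            else (if p.2 then (p.1, false) else p)) (0, true) := by
    rw [List.foldl_map]
  rw [hmap, foldlA_eq_pvG sv]
  set bs := ts.map (fun e => PySem.Int.toStr e.2 == PySem.Int.toStr sv) with hbs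
  rw [pvRunKeys_eq bs]
  cases bs with
  | nil => simp [pvG]
  | cons b r =>
    cases b <;>
      simp [pvG, List.count_cons, pvG_eq_count r, Int.add_comm] <;> omega

-- ===== VERDICT (by name: the statement is the Claim_ definition above) =====
theorem count_state_change_spec : Claim_equal_count_state_change := by
  intro time_series state_value _ _
  unfold Spec_count_state_change count_state_change count_state_change_alt
  refine congrArg (fun l => [l]) (congrArg (fun f => List.foldl f ([] : List (Int × Int)) time_series) ?_)
  funext output ts
  simpa using congrArg (fun c => output ++ [(((PySem.List.pyGet? ts 0).getD (0, 0)).1, c)])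
    (per_series state_value ts)
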